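-- pv_equiv track=rewrite | github.com/georgeIshaq/Math_AI | main.py | axiom2_ancestor_transitive
-- ===== SOURCE A (Python) =====
-- def axiom2_ancestor_transitive(facts):
--     """Applies the rule: ∀x,y,z (Ancestor(x, y) ∧ Ancestor(y, z) → Ancestor(x, z))"""
--     new_facts = set()
--     # Create a list of ancestor pairs for efficient lookup
--     ancestor_pairs = []
--     for fact in facts:
--         if fact.startswith("Ancestor("):
--             content = fact[9:-1]
--             parts = content.split(',')
--             if len(parts) == 2:
--                 ancestor_pairs.append((parts[0].strip(), parts[1].strip()))
--
--     # Check all combinations for transitivity (can be computationally expensive)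
--     # Iterate through pairs (x, y1) and (y2, z)
--     for x, y1 in ancestor_pairs:
--         for y2, z in ancestor_pairs:
--             # If the intermediate nodes match (y1 == y2)
--             if y1 == y2:
--                 # Derive the new transitive relationship
--                 new_fact = f"Ancestor({x},{z})"
--                 if new_fact not in facts:
--                     new_facts.add(new_fact)
--     return new_facts
-- ===== SOURCE B (Python) =====
-- def axiom2_ancestor_transitive(facts):
--     """Applies the rule: Ancestor(x,y) & Ancestor(y,z) -> Ancestor(x,z) via a node-keyed hash join."""
--     pairs = []
--     for fact in facts:
--         if fact.startswith("Ancestor("):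
--             parts = fact[9:-1].split(',')
--             if len(parts) == 2:
--                 pairs.append((parts[0].strip(), parts[1].strip()))
--     # index the pairs by their first node: succ[a] = all b with Ancestor(a, b)
--     succ = {}
--     for a, b in pairs:
--         succ[a] = succ.get(a, []) + [b]
--     fact_set = set(facts)
--     new_facts = set()
--     for x, y in pairs:
--         for z in succ.get(y, []):
--             new_fact = f"Ancestor({x},{z})"
--             if new_fact not in fact_set:
--                 new_facts.add(new_fact)
--     return new_facts
-- ===== Notes on version B (the rewrite author's own statement) =====
-- stated objective: alternative
-- what changed: The quadratic all-pairs-vs-all-pairs scan is replaced by a hash join: a dict succ built once maps each first node to its successor list, so each outer pair iterates only its matching successors instead of rescanning every pair, and the 'not in facts' list scan becomes a set lookup; on inputs with few parsed pairs the index-building overhead cancels the gain, so no speedup is claimed.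
import Mathlib
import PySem

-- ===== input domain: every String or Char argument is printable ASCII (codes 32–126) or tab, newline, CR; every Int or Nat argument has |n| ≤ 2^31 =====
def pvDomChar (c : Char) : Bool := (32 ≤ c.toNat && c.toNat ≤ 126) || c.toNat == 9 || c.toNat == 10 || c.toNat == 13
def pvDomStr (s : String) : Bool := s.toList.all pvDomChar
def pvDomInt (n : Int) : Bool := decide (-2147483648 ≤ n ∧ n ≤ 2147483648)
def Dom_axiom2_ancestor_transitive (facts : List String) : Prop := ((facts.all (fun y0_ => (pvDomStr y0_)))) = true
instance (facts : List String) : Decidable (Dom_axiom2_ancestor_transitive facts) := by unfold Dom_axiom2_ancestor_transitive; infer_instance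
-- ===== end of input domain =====

-- B replaces A's pair-vs-pair scan by a dict indexed on the join node (and a set for the
-- membership test); an alternative algorithm, no speed claim. Equivalence is about the returned value.

-- ===== PORT A =====
-- shared parsing loop (identical in both Pythons): Ancestor(...) facts to stripped (x, y) pairs
def pvParsePairs (facts : List String) : List (String × String) :=
  facts.foldl (fun acc fact =>
    if PySem.Str.startswith fact "Ancestor(" then
      match PySem.Str.split? (PySem.Str.slice fact (some 9) (some (-1))) "," with
      | some [p0, p1] => acc ++ [(PySem.Str.strip p0, PySem.Str.strip p1)]
      | _ => acc
    else acc) []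

def axiom2_ancestor_transitive (facts : List String) : List String :=
  let pairs := pvParsePairs facts
  pairs.foldl (fun nf p =>
    pairs.foldl (fun nf q =>
      if p.2 == q.1 then
        let newFact := "Ancestor(" ++ p.1 ++ "," ++ q.2 ++ ")"
        if facts.contains newFact then nf else PySem.Set.add nf newFact
      else nf) nf) []

-- ===== PORT B =====
def axiom2_ancestor_transitive_alt (facts : List String) : List String :=
  let pairs := pvParsePairs facts
  let succ := pairs.foldl (fun d p => d.modify p.1 [] (· ++ [p.2])) PySem.Dict.empty
  let factSet := PySem.Set.ofList facts
  pairs.foldl (fun nf p =>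
    (succ.getD p.2 []).foldl (fun nf z =>
      let newFact := "Ancestor(" ++ p.1 ++ "," ++ z ++ ")"
      if factSet.contains newFact then nf else PySem.Set.add nf newFact) nf) []

-- ===== PRECONDITION & SPEC =====
def Spec_axiom2_ancestor_transitive (facts : List String) (out : List String) : Prop := out = axiom2_ancestor_transitive_alt facts
instance (facts : List String) (out : List String) : Decidable (Spec_axiom2_ancestor_transitive facts out) := by unfold Spec_axiom2_ancestor_transitive; infer_instance

-- ===== CLAIM (what is proved, stated in full; the proofs are below) =====
def Claim_equal_axiom2_ancestor_transitive : Prop := ∀ (facts : List String), Dom_axiom2_ancestor_transitive facts → Spec_axiom2_ancestor_transitive facts (axiom2_ancestor_transitive facts)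

-- ===== LEMMAS AND PROOFS =====

-- A's inner filtered scan equals a fold over the matching second components
theorem pv_join_filter (g : List String → String → List String) (y : String) :
    ∀ (l : List (String × String)) (nf : List String),
      l.foldl (fun nf q => if y == q.1 then g nf q.2 else nf) nf
        = ((l.filter (fun q => q.1 == y)).map (·.2)).foldl g nf := by
  intro l
  induction l with
  | nil => intro nf; rfl
  | cons q rest ih =>
    intro nf
    rw [List.foldl_cons, List.filter_cons]
    by_cases h : q.1 = y
    · simp only [show (q.1 == y) = true by simp [h], show (y == q.1) = true by simp [h],
        if_true, List.map_cons, List.foldl_cons]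
      exact ih _
    · simp only [show (q.1 == y) = false by simp [h], show (y == q.1) = false by simp [Ne.symm h],
        Bool.false_eq_true, if_false]
      exact ih _

theorem pv_set_contains (facts : List String) (s : String) :
    (PySem.Set.ofList facts).contains s = facts.contains s := by
  by_cases h : s ∈ facts <;>
    simp [PySem.Set.contains_eq_listContains, PySem.Set.mem_ofList, h]

-- ===== VERDICT (by name: the statement is the Claim_ definition above) =====
theorem axiom2_ancestor_transitive_spec : Claim_equal_axiom2_ancestor_transitive := by
  intro facts _
  unfold Spec_axiom2_ancestor_transitive axiom2_ancestor_transitive axiom2_ancestor_transitive_alt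
  apply PySem.List.foldl_congr_mem
  intro nf p _
  rw [PySem.Dict.getD_foldl_modify_append, PySem.Dict.getD_empty, List.nil_append]
  simp only [pv_set_contains]
  exact pv_join_filter
    (fun nf z =>
      if facts.contains ("Ancestor(" ++ p.1 ++ "," ++ z ++ ")") then nf
      else PySem.Set.add nf ("Ancestor(" ++ p.1 ++ "," ++ z ++ ")"))
    p.2 (pvParsePairs facts) nf
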